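-- pv_equiv track=rewrite | github.com/chenwi/dbCPI | 3-gram/text_preprocess.py | sent_token
-- ===== SOURCE A (Python) =====
-- def sent_token(sen):
--     words = sen.split()
--     res = []
--     for word in words:
--         if len(word) < 3:
--             if len(word) == 1:
--                 res.append("#" + word + "#")
--             elif len(word) == 2:
--                 res.append("#" + word)
--                 res.append(word + "#")
--         else:
--             res.append("#" + word[:2])
--             i = 0
--             while i < len(word) - 2:
--                 res.append(word[i:i + 3])
--                 i += 1
--             res.append(word[-2:] + "#")
--     return " ".join(res)
-- ===== SOURCE B (Python) =====
-- def sent_token(sen):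
--     grams = []
--     for word in sen.split():
--         p = "#" + word + "#"
--         for i in range(len(p) - 2):
--             grams.append(p[i:i + 3])
--     return " ".join(grams)
-- ===== Notes on version B (the rewrite author's own statement) =====
-- stated objective: simpler
-- what changed: Replaces A's three-way length case analysis (len 1 / len 2 / >=3 with separate edge appends and a while loop over the unpadded word) with a single uniform sliding 3-window over an explicitly materialized padded string '#'+word+'#'.
import Mathlib
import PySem

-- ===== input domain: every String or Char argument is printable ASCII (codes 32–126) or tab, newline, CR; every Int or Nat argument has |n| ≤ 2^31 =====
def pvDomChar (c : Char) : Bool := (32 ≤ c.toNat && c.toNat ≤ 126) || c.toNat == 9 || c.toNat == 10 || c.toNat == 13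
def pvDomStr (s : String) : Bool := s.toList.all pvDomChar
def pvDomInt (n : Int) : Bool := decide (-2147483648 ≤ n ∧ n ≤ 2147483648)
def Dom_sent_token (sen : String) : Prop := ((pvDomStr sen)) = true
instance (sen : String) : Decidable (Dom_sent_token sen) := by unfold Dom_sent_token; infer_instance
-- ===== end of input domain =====

-- B replaces A's three-way length case analysis with one uniform sliding 3-window
-- over an explicitly padded word "#"+word+"#" (objective: simpler).

-- ===== PORT A =====
-- the 'while i < len(word) - 2: res.append(word[i:i+3]); i += 1' loop of A
def aGrams (w : List Char) (i : Nat) : List (List Char) :=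
  if h : i < w.length - 2 then
    PySem.List.slice w (some (i : Int)) (some ((i : Int) + 3)) :: aGrams w (i + 1)
  else []
termination_by w.length - 2 - i

-- what A's loop body appends for one word
def aWord (w : List Char) : List (List Char) :=
  if w.length < 3 then
    if w.length = 1 then [['#'] ++ w ++ ['#']]
    else if w.length = 2 then [['#'] ++ w, w ++ ['#']]
    else []
  else
    (['#'] ++ PySem.List.slice w none (some 2)) ::
      (aGrams w 0 ++ [PySem.List.slice w (some (-2)) none ++ ['#']])

def sent_token (sen : String) : String :=
  let words := PySem.Str.split₀ sen
  let res := words.foldl (fun acc w => acc ++ aWord w.toList) []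
  PySem.Str.join " " (res.map String.ofList)

-- ===== PORT B =====
-- for one word: p = '#' + word + '#'; all p[i:i+3] for i in range(len(p)-2)
def bWord (w : List Char) : List (List Char) :=
  let p := ['#'] ++ w ++ ['#']
  (List.range (p.length - 2)).map
    (fun (i : Nat) => PySem.List.slice p (some (i : Int)) (some ((i : Int) + 3)))

def sent_token_alt (sen : String) : String :=
  let words := PySem.Str.split₀ sen
  let grams := words.foldl (fun acc w => acc ++ bWord w.toList) []
  PySem.Str.join " " (grams.map String.ofList)

-- ===== PRECONDITION & SPEC =====
def Spec_sent_token (sen : String) (out : String) : Prop := out = sent_token_alt sen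
instance (sen : String) (out : String) : Decidable (Spec_sent_token sen out) := by unfold Spec_sent_token; infer_instance

-- ===== CLAIM (what is proved, stated in full; the proofs are below) =====
def Claim_equal_sent_token : Prop := ∀ (sen : String), Dom_sent_token sen → Spec_sent_token sen (sent_token sen)

-- ===== LEMMAS AND PROOFS =====

-- all contiguous windows of length 3, structurally
def win3 : List Char → List (List Char)
  | a :: b :: c :: t => [a, b, c] :: win3 (b :: c :: t)
  | _ => []

theorem win3_short (l : List Char) (h : l.length < 3) : win3 l = [] := by
  match l with
  | [] => rfl
  | [_] => rfl
  | [_, _] => rfl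
  | _ :: _ :: _ :: _ => simp only [List.length_cons] at h; omega

theorem win3_long (l : List Char) (h : 3 ≤ l.length) :
    win3 l = l.take 3 :: win3 l.tail := by
  match l with
  | [] => simp at h
  | [_] => simp at h
  | [_, _] => simp only [List.length_cons, List.length_nil] at h; omega
  | a :: b :: c :: t => rfl

theorem slice3_eq (xs : List Char) (i : Nat) :
    PySem.List.slice xs (some (i : Int)) (some ((i : Int) + 3)) = (xs.drop i).take 3 := by
  rw [PySem.List.slice_toNat xs (by positivity) (by positivity)]
  congr 1
  omega

theorem range_map_win3 (xs : List Char) :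
    (List.range (xs.length - 2)).map (fun i => (xs.drop i).take 3) = win3 xs := by
  induction xs with
  | nil => rfl
  | cons a t ih =>
    by_cases h : t.length < 2
    · rw [win3_short _ (by simp only [List.length_cons]; omega)]
      have h0 : (a :: t).length - 2 = 0 := by simp only [List.length_cons]; omega
      rw [h0]; rfl
    · rw [win3_long _ (by simp only [List.length_cons]; omega)]
      have hlen : (a :: t).length - 2 = (t.length - 2) + 1 := by
        simp only [List.length_cons]; omega
      rw [hlen, List.range_succ_eq_map, List.map_cons, List.map_map]
      have hf : ((fun i => ((a :: t).drop i).take 3) ∘ Nat.succ)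
              = (fun i => (t.drop i).take 3) := by
        funext i; simp
      rw [hf, ih]
      rfl

-- B's range-map over the padded word is exactly its window list
theorem bWord_eq_win3 (w : List Char) : bWord w = win3 (['#'] ++ w ++ ['#']) := by
  rw [bWord]
  simp only [slice3_eq]
  exact range_map_win3 _

theorem aGrams_eq_win3 (w : List Char) : ∀ i : Nat, aGrams w i = win3 (w.drop i) := by
  intro i
  rw [aGrams]
  by_cases h : i < w.length - 2
  · rw [dif_pos h, slice3_eq, win3_long _ (by rw [List.length_drop]; omega),
      List.tail_drop, aGrams_eq_win3 w (i + 1)]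
  · rw [dif_neg h, win3_short _ (by rw [List.length_drop]; omega)]
termination_by i => w.length - 2 - i

theorem drop_len_sub_two_cons (x : Char) (l : List Char) (h : 2 ≤ l.length) :
    (x :: l).drop ((x :: l).length - 2) = l.drop (l.length - 2) := by
  have hl : (x :: l).length - 2 = (l.length - 2) + 1 := by
    simp only [List.length_cons]; omega
  rw [hl, List.drop_succ_cons]

theorem win3_append_hash (w : List Char) (h : 2 ≤ w.length) :
    win3 (w ++ ['#']) = win3 w ++ [w.drop (w.length - 2) ++ ['#']] := by
  match w, h with
  | [], h => simp at h
  | [_], h => simp only [List.length_cons, List.length_nil] at h; omega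
  | [a, b], _ => rfl
  | a :: b :: c :: t, _ =>
    have ih := win3_append_hash (b :: c :: t) (by simp)
    show [a, b, c] :: win3 ((b :: c :: t) ++ ['#']) = _
    rw [ih, win3, drop_len_sub_two_cons a (b :: c :: t) (by simp)]
    rfl
termination_by w.length

theorem wordEq (w : List Char) : bWord w = aWord w := by
  rw [bWord_eq_win3]
  match w with
  | [] => rfl
  | [a] => rfl
  | [a, b] => rfl
  | a :: b :: c :: t =>
    rw [aWord, if_neg (by simp)]
    show ['#', a, b] :: win3 ((a :: b :: c :: t) ++ ['#']) = _
    rw [win3_append_hash _ (by simp), aGrams_eq_win3 _ 0, List.drop_zero,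
      PySem.List.slice_to _ (by norm_num),
      PySem.List.slice_from_neg_ofNat _ 2 (by norm_num)]
    rfl

-- ===== VERDICT (by name: the statement is the Claim_ definition above) =====
theorem sent_token_spec : Claim_equal_sent_token := by
  intro sen _
  show sent_token sen = sent_token_alt sen
  rw [sent_token, sent_token_alt]
  have h : (fun (acc : List (List Char)) (w : String) => acc ++ bWord w.toList)
         = (fun acc w => acc ++ aWord w.toList) := by
    funext acc w; rw [wordEq]
  rw [h]
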